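-- pv_equiv track=rewrite | github.com/linhdvu14/cp-sols | sols/CodeForces/1728_edu/D_Letter_Picking.py | solve
-- ===== SOURCE A (Python) =====
-- def solve(S):
--     N = len(S)
--
--     # dp[i][j] = 1 if S[i:j] win, 0 if draw
--     dp = [[1] * (N+1) for _ in range(N+1)]
--     for i in range(N+1): dp[i][i] = 0
--     for i in range(N-1): dp[i][i+2] = 0 if S[i] == S[i+1] else 1
--
--     for d in range(4, N+1, 2):
--         for i in range(N-d+1):
--             c1 = S[i] == S[i+d-1] and dp[i+1][i+d-1] == 0
--             c2 = S[i] == S[i+1] and dp[i+2][i+d] == 0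
--             c3 = S[i+d-1] == S[i+d-2] and dp[i][i+d-2] == 0
--             if (c1 or c2) and (c1 or c3): dp[i][i+d] = 0
--
--     return 'Alice' if dp[0][N] == 1 else 'Draw'
-- ===== SOURCE B (Python) =====
-- def solve(S):
--     # Two-pointer greedy: strip mirror-equal ends, then the remainder must
--     # split into adjacent equal pairs for a draw.
--     l, r = 0, len(S) - 1
--     while l < r and S[l] == S[r]:
--         l += 1
--         r -= 1
--     if l > r:
--         return 'Draw'
--     if (r - l) % 2 == 0:
--         return 'Alice'
--     while l < r:
--         if S[l] != S[l + 1]: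
--             return 'Alice'
--         l += 2
--     return 'Draw'
-- ===== Notes on version B (the rewrite author's own statement) =====
-- stated objective: faster
-- what changed: Replaces the O(N^2) interval dp over all even substrings by a linear two-pointer scan: strip mirror-equal end pairs inward, then the remaining middle is a draw iff it decomposes into adjacent equal pairs.
import Mathlib
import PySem

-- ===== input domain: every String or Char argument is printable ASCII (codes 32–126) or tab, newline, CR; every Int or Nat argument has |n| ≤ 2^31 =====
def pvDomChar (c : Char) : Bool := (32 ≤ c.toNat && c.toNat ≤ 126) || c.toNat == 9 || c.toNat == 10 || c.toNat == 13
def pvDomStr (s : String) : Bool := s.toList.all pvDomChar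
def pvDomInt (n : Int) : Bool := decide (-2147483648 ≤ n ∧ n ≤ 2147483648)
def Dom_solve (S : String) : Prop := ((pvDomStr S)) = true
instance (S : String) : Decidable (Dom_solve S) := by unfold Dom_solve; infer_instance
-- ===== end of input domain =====

-- B replaces A's O(N^2) interval dp by a linear two-pointer greedy (strip mirror-equal ends, then check adjacent pairs); return values proved equal on all inputs.

-- ===== PORT A =====
-- character read S[i] (every read A performs is in range, so the default is never returned)
def chA (s : List Char) (i : Nat) : Char := s.getD i ' '
-- dp[i][j] read / write on the nested-list table, as in Python
def get2 (dp : List (List Int)) (i j : Nat) : Int := (dp.getD i []).getD j 1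
def set2 (dp : List (List Int)) (i j : Nat) (v : Int) : List (List Int) :=
  dp.set i ((dp.getD i []).set j v)

-- loop body of 'for i in range(N-d+1)': the three conditions and the conditional write
def innerStep (s : List Char) (d : Nat) (dp : List (List Int)) (i : Nat) : List (List Int) :=
  let c1 := chA s i = chA s (i+d-1) ∧ get2 dp (i+1) (i+d-1) = 0
  let c2 := chA s i = chA s (i+1) ∧ get2 dp (i+2) (i+d) = 0
  let c3 := chA s (i+d-1) = chA s (i+d-2) ∧ get2 dp i (i+d-2) = 0
  if (c1 ∨ c2) ∧ (c1 ∨ c3) then set2 dp i (i+d) 0 else dp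

-- loop body of 'for d in range(4, N+1, 2)'
def outerStep (s : List Char) (N : Nat) (dp : List (List Int)) (d : Nat) : List (List Int) :=
  (List.range (N-d+1)).foldl (innerStep s d) dp

def solve (S : String) : String :=
  let s := S.toList
  let N := s.length
  -- dp = [[1] * (N+1) for _ in range(N+1)]
  let dp0 : List (List Int) := List.replicate (N+1) (List.replicate (N+1) 1)
  -- for i in range(N+1): dp[i][i] = 0
  let dp1 := (List.range (N+1)).foldl (fun dp i => set2 dp i i 0) dp0
  -- for i in range(N-1): dp[i][i+2] = 0 if S[i] == S[i+1] else 1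
  let dp2 := (List.range (N-1)).foldl
    (fun dp i => set2 dp i (i+2) (if chA s i = chA s (i+1) then 0 else 1)) dp1
  -- for d in range(4, N+1, 2): range(4, N+1, 2) = [4, 6, …] with (N-2)/2 entries
  let dp3 := (List.range' 4 ((N-2)/2) 2).foldl (outerStep s N) dp2
  if get2 dp3 0 N = 1 then "Alice" else "Draw"

-- ===== PORT B =====
-- while l < r and S[l] == S[r]: l += 1; r -= 1
def bStrip (s : List Char) (l r : Int) : Int × Int :=
  if l < r ∧ chA s l.toNat = chA s r.toNat then bStrip s (l+1) (r-1) else (l, r)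
termination_by (r - l).toNat
decreasing_by omega

-- while l < r: if S[l] != S[l+1]: return 'Alice'; l += 2   / 'Draw'
def bPairs (s : List Char) (l r : Int) : String :=
  if l < r then
    if chA s l.toNat ≠ chA s (l+1).toNat then "Alice" else bPairs s (l+2) r
  else "Draw"
termination_by (r - l).toNat
decreasing_by omega

def solve_alt (S : String) : String :=
  let s := S.toList
  let p := bStrip s 0 ((s.length : Int) - 1)
  if p.1 > p.2 then "Draw"
  else if PySem.Int.mod (p.2 - p.1) 2 = 0 then "Alice"
  else bPairs s p.1 p.2

-- ===== PRECONDITION & SPEC =====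
def Spec_solve (S : String) (out : String) : Prop := out = solve_alt S
instance (S : String) (out : String) : Decidable (Spec_solve S out) := by unfold Spec_solve; infer_instance

-- ===== CLAIM (what is proved, stated in full; the proofs are below) =====
def Claim_equal_solve : Prop := ∀ (S : String), Dom_solve S → Spec_solve S (solve S)

-- ===== LEMMAS AND PROOFS =====

-- the dp recurrence of A, as a recursion on the (even) interval length d at left end i
def drawB (s : List Char) (i d : Nat) : Bool :=
  match d with
  | 0 => true
  | 1 => false
  | 2 => chA s i = chA s (i+1)
  | (m+3) =>
    let d := m+3
    let c1 := (chA s i = chA s (i+d-1) : Bool) && drawB s (i+1) (m+1)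
    let c2 := (chA s i = chA s (i+1) : Bool) && drawB s (i+2) (m+1)
    let c3 := (chA s (i+d-1) = chA s (i+d-2) : Bool) && drawB s i (m+1)
    (c1 || c2) && (c1 || c3)

-- "the block of length d starting at i is made of adjacent equal pairs"
def Mb (s : List Char) (i d : Nat) : Bool :=
  match d with
  | 0 => true
  | 1 => false
  | (m+2) => (chA s i = chA s (i+1) : Bool) && Mb s (i+2) m

-- greedy characterization: strip mirror-equal ends, then pairs
def Gb (s : List Char) (i d : Nat) : Bool :=
  match d with
  | 0 => true
  | 1 => false
  | (m+2) => if chA s i = chA s (i+m+1) then Gb s (i+1) m else Mb s i (m+2)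

-- index congruence for character reads
theorem chA_congr (s : List Char) {a b : Nat} (h : a = b) : chA s a = chA s b := by rw [h]

-- Mb split off the first pair
theorem Mb_cons (s : List Char) (i m : Nat) :
    Mb s i (m+2) = true ↔ (chA s i = chA s (i+1) ∧ Mb s (i+2) m = true) := by
  simp [Mb]

-- Mb drops its last pair
theorem Mb_snoc (s : List Char) : ∀ (m i : Nat),
    Mb s i (m+2) = true ↔ (Mb s i m = true ∧ chA s (i+m) = chA s (i+m+1)) := by
  intro m
  induction m using Nat.twoStepInduction with
  | zero => intro i; simp [Mb]
  | one => intro i; simp [Mb]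
  | more m ih _ =>
    intro i
    rw [Mb_cons, ih (i+2), Mb_cons]
    constructor
    · rintro ⟨h1, h2, h3⟩
      refine ⟨⟨h1, h2⟩, ?_⟩
      calc chA s (i+(m+2)) = chA s (i+2+m) := chA_congr s (by omega)
        _ = chA s (i+2+m+1) := h3
        _ = chA s (i+(m+2)+1) := chA_congr s (by omega)
    · rintro ⟨⟨h1, h2⟩, h3⟩
      refine ⟨h1, h2, ?_⟩
      calc chA s (i+2+m) = chA s (i+(m+2)) := chA_congr s (by omega)
        _ = chA s (i+(m+2)+1) := h3
        _ = chA s (i+2+m+1) := chA_congr s (by omega)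

-- Mb of an odd length is false
theorem Mb_odd (s : List Char) : ∀ (m i : Nat), m % 2 = 1 → Mb s i m = false := by
  intro m
  induction m using Nat.twoStepInduction with
  | zero => intro i h; omega
  | one => intro i _; simp [Mb]
  | more m ih _ =>
    intro i h
    show (decide (chA s i = chA s (i+1)) && Mb s (i+2) m) = false
    rw [ih (i+2) (by omega)]; simp

-- one-step unfolding of the greedy check
theorem Gb_unfold (s : List Char) (i m : Nat) :
    Gb s i (m+2) = if chA s i = chA s (i+m+1) then Gb s (i+1) m else Mb s i (m+2) := rfl

-- a pairs-block is a draw for A's dp recurrence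
theorem Mb_drawB (s : List Char) : ∀ (d i : Nat), Mb s i d = true → drawB s i d = true := by
  intro d
  induction d using Nat.strong_induction_on with
  | _ d ih =>
    intro i hM
    match d with
    | 0 => simp [drawB]
    | 1 => simp [Mb] at hM
    | 2 =>
      obtain ⟨h1, -⟩ := (Mb_cons s i 0).mp hM
      simp [drawB, h1]
    | (m+3) =>
      by_cases hpar : (m+3) % 2 = 1
      · rw [Mb_odd s _ i hpar] at hM; simp at hM
      · obtain ⟨hp1, hMrest⟩ := (Mb_cons s i (m+1)).mp hM
        obtain ⟨hMfront, hlast⟩ := (Mb_snoc s (m+1) i).mp hM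
        have hd2 : drawB s (i+2) (m+1) = true := ih (m+1) (by omega) (i+2) hMrest
        have hd3 : drawB s i (m+1) = true := ih (m+1) (by omega) i hMfront
        show ((_ || _) && (_ || _)) = true
        simp [hp1, hd2, hd3]
        exact Or.inr (calc chA s (i+(m+2)) = chA s (i+(m+1)+1) := chA_congr s (by omega)
          _ = chA s (i+(m+1)) := hlast.symm
          _ = chA s (i+(m+3)-2) := chA_congr s (by omega))

-- a pairs-block passes the greedy check
theorem Mb_Gb (s : List Char) : ∀ (d i : Nat), Mb s i d = true → Gb s i d = true := by
  intro d
  induction d using Nat.strong_induction_on with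
  | _ d ih =>
    intro i hM
    match d with
    | 0 => simp [Gb]
    | 1 => simp [Mb] at hM
    | (m+2) =>
      rw [Gb_unfold]
      by_cases hc : chA s i = chA s (i+m+1)
      · rw [if_pos hc]
        match m with
        | 0 => simp [Gb]
        | 1 => rw [Mb_odd s 3 i (by omega)] at hM; simp at hM
        | (k+2) =>
          obtain ⟨hp1, hMrest⟩ := (Mb_cons s i (k+2)).mp hM
          obtain ⟨hMfront, hlast⟩ := (Mb_snoc s (k+2) i).mp hM
          rw [Gb_unfold]
          have hends : chA s (i+1) = chA s (i+1+k+1) := by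
            calc chA s (i+1) = chA s i := hp1.symm
              _ = chA s (i+(k+2)+1) := hc
              _ = chA s (i+(k+2)) := hlast.symm
              _ = chA s (i+1+k+1) := chA_congr s (by omega)
          rw [if_pos hends]
          obtain ⟨hMmid, -⟩ := (Mb_snoc s k (i+2)).mp hMrest
          exact ih k (by omega) (i+2) hMmid
      · rw [if_neg hc]; exact hM

-- key combination lemma: pairs at both ends plus greedy-draw on both one-pair-shorter
-- blocks gives greedy-draw on the whole block
theorem W_lemma (s : List Char) : ∀ (m i : Nat), m % 2 = 0 →
    chA s i = chA s (i+1) → chA s (i+m) = chA s (i+m+1) →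
    Gb s (i+2) m = true → Gb s i m = true → Gb s i (m+2) = true := by
  intro m
  induction m using Nat.strong_induction_on with
  | _ m ih =>
    intro i hpar hpL hpR hL hR
    rcases m with _ | _ | k
    case zero =>
      rw [Gb_unfold]
      by_cases hc : chA s i = chA s (i+0+1)
      · rw [if_pos hc]; simp [Gb]
      · rw [if_neg hc]
        exact (Mb_cons s i 0).mpr ⟨hpL, by simp [Mb]⟩
    case succ.zero => omega
    case succ.succ =>
      rw [Gb_unfold (s := s) (i := i+2) (m := k)] at hL
      by_cases hcL : chA s (i+2) = chA s (i+2+k+1)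
      case neg =>
        rw [if_neg hcL] at hL
        exact Mb_Gb s (k+2+2) i ((Mb_cons s i (k+2)).mpr ⟨hpL, hL⟩)
      case pos =>
        rw [if_pos hcL] at hL
        rw [Gb_unfold (s := s) (i := i) (m := k)] at hR
        by_cases hcR : chA s i = chA s (i+k+1)
        case neg =>
          rw [if_neg hcR] at hR
          apply Mb_Gb s (k+2+2) i
          apply (Mb_snoc s (k+2) i).mpr
          exact ⟨hR, hpR⟩
        case pos =>
          rw [if_pos hcR] at hR
          -- a := ch i = ch (i+1) = ch (i+k+1) ; b := ch (i+2) = ch (i+k+3) = ch (i+k+2)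
          have hb2 : chA s (i+2) = chA s (i+(k+2)+1) := by
            calc chA s (i+2) = chA s (i+2+k+1) := hcL
              _ = chA s (i+(k+2)+1) := chA_congr s (by omega)
          by_cases hab : chA s i = chA s (i+(k+2)+1)
          case pos =>
            rw [Gb_unfold]
            rw [if_pos (show chA s i = chA s (i+(k+2)+1) from hab)]
            refine ih k (by omega) (i+1) (by omega) ?_ ?_ ?_ ?_
            · calc chA s (i+1) = chA s i := hpL.symm
                _ = chA s (i+(k+2)+1) := hab
                _ = chA s (i+2) := hb2.symm
                _ = chA s (i+1+1) := chA_congr s (by omega)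
            · calc chA s (i+1+k) = chA s (i+k+1) := chA_congr s (by omega)
                _ = chA s i := hcR.symm
                _ = chA s (i+(k+2)+1) := hab
                _ = chA s (i+(k+2)) := hpR.symm
                _ = chA s (i+1+k+1) := chA_congr s (by omega)
            · show Gb s (i+1+2) k = true
              have e : i+1+2 = i+3 := by omega
              rw [e]; exact hL
            · exact hR
          case neg =>
            -- ends differ: the whole block must be all pairs
            rcases k with _ | _ | j
            case zero =>
              apply Mb_Gb s 4 i
              apply (Mb_cons s i 2).mpr
              refine ⟨hpL, (Mb_cons s (i+2) 0).mpr ⟨?_, by simp [Mb]⟩⟩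
              calc chA s (i+2) = chA s (i+(0+2)) := chA_congr s (by omega)
                _ = chA s (i+(0+2)+1) := hpR
                _ = chA s (i+2+1) := chA_congr s (by omega)
            case succ.zero => omega
            case succ.succ =>
              rw [Gb_unfold (s := s) (i := i+3) (m := j)] at hL
              by_cases hcL2 : chA s (i+3) = chA s (i+3+j+1)
              case neg =>
                exfalso
                rw [if_neg hcL2] at hL
                obtain ⟨-, hlp⟩ := (Mb_snoc s j (i+3)).mp hL
                apply hab
                calc chA s i = chA s (i+(j+2)+1) := hcR
                  _ = chA s (i+3+j) := chA_congr s (by omega)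
                  _ = chA s (i+3+j+1) := hlp
                  _ = chA s (i+(j+2+2)) := chA_congr s (by omega)
                  _ = chA s (i+(j+2+2)+1) := hpR
              case pos =>
                rw [if_pos hcL2] at hL
                rw [Gb_unfold (s := s) (i := i+1) (m := j)] at hR
                by_cases hcR2 : chA s (i+1) = chA s (i+1+j+1)
                case neg =>
                  exfalso
                  rw [if_neg hcR2] at hR
                  obtain ⟨hfst, -⟩ := (Mb_cons s (i+1) j).mp hR
                  apply hab
                  calc chA s i = chA s (i+1) := hpL
                    _ = chA s (i+1+1) := hfst
                    _ = chA s (i+2) := chA_congr s (by omega)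
                    _ = chA s (i+(j+2+2)+1) := hb2
                case pos =>
                  rw [if_pos hcR2] at hR
                  have hjp : j % 2 = 0 := by omega
                  have hA : chA s (i+2) = chA s (i+2+1) := by
                    calc chA s (i+2) = chA s (i+(j+2+2)+1) := hb2
                      _ = chA s (i+(j+2+2)) := hpR.symm
                      _ = chA s (i+3+j+1) := chA_congr s (by omega)
                      _ = chA s (i+3) := hcL2.symm
                      _ = chA s (i+2+1) := chA_congr s (by omega)
                  have hB : chA s (i+2+j) = chA s (i+2+j+1) := by
                    calc chA s (i+2+j) = chA s (i+1+j+1) := chA_congr s (by omega)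
                      _ = chA s (i+1) := hcR2.symm
                      _ = chA s i := hpL.symm
                      _ = chA s (i+(j+2)+1) := hcR
                      _ = chA s (i+2+j+1) := chA_congr s (by omega)
                  have hC : Gb s (i+2+2) j = true := by
                    have e : i+2+2 = i+3+1 := by omega
                    rw [e]; exact hL
                  have hmid : Gb s (i+2) (j+2) = true :=
                    ih j (by omega) (i+2) hjp hA hB hC hR
                  rw [Gb_unfold (s := s) (i := i+2) (m := j)] at hmid
                  have hne : ¬ chA s (i+2) = chA s (i+2+j+1) := by
                    intro hcon
                    apply hab
                    calc chA s i = chA s (i+(j+2)+1) := hcR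
                      _ = chA s (i+2+j+1) := chA_congr s (by omega)
                      _ = chA s (i+2) := hcon.symm
                      _ = chA s (i+(j+2+2)+1) := hb2
                  rw [if_neg hne] at hmid
                  -- assemble Mb s i (j+2+2+2)
                  apply Mb_Gb s (j+2+2+2) i
                  apply (Mb_cons s i (j+2+2)).mpr
                  refine ⟨hpL, ?_⟩
                  apply (Mb_snoc s (j+2) (i+2)).mpr
                  refine ⟨hmid, ?_⟩
                  calc chA s (i+2+(j+2)) = chA s (i+(j+2+2)) := chA_congr s (by omega)
                    _ = chA s (i+(j+2+2)+1) := hpR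
                    _ = chA s (i+2+(j+2)+1) := chA_congr s (by omega)

-- Prop form of the dp recurrence step
theorem drawB_iff (s : List Char) (i m : Nat) : drawB s i (m+3) = true ↔
    ((chA s i = chA s (i+(m+3)-1) ∧ drawB s (i+1) (m+1) = true) ∨
     (chA s i = chA s (i+1) ∧ drawB s (i+2) (m+1) = true)) ∧
    ((chA s i = chA s (i+(m+3)-1) ∧ drawB s (i+1) (m+1) = true) ∨
     (chA s (i+(m+3)-1) = chA s (i+(m+3)-2) ∧ drawB s i (m+1) = true)) := by
  show ((_ || _) && (_ || _)) = true ↔ _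
  simp

theorem drawB_Gb (s : List Char) : ∀ (d i : Nat), d % 2 = 0 →
    drawB s i d = true → Gb s i d = true := by
  intro d
  induction d using Nat.strong_induction_on with
  | _ d ih =>
    intro i hpar hD
    match d, hpar, hD with
    | 0, _, _ => simp [Gb]
    | 2, _, hD =>
      rw [Gb_unfold]
      have hc : chA s i = chA s (i+0+1) := by
        have : (decide (chA s i = chA s (i+1))) = true := hD
        simp only [decide_eq_true_eq] at this
        calc chA s i = chA s (i+1) := this
          _ = chA s (i+0+1) := chA_congr s (by omega)
      rw [if_pos hc]; simp [Gb]
    | (m+3), hpar, hD =>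
      obtain ⟨h12, h13⟩ := (drawB_iff s i m).mp hD
      have hGoal : Gb s i ((m+1)+2) = true → Gb s i (m+3) = true := by
        intro h
        have e : (m+1)+2 = m+3 := by omega
        rw [← e]; exact h
      apply hGoal
      rcases h12 with ⟨hc, hd⟩ | ⟨hc2, hd2⟩
      · rw [Gb_unfold]
        have hc' : chA s i = chA s (i+(m+1)+1) := by
          calc chA s i = chA s (i+(m+3)-1) := hc
            _ = chA s (i+(m+1)+1) := chA_congr s (by omega)
        rw [if_pos hc']
        exact ih (m+1) (by omega) (i+1) (by omega) hd
      · rcases h13 with ⟨hc, hd⟩ | ⟨hc3, hd3⟩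
        · rw [Gb_unfold]
          have hc' : chA s i = chA s (i+(m+1)+1) := by
            calc chA s i = chA s (i+(m+3)-1) := hc
              _ = chA s (i+(m+1)+1) := chA_congr s (by omega)
          rw [if_pos hc']
          exact ih (m+1) (by omega) (i+1) (by omega) hd
        · have hGL : Gb s (i+2) (m+1) = true := ih (m+1) (by omega) (i+2) (by omega) hd2
          have hGR : Gb s i (m+1) = true := ih (m+1) (by omega) i (by omega) hd3
          have hpR' : chA s (i+(m+1)) = chA s (i+(m+1)+1) := by
            calc chA s (i+(m+1)) = chA s (i+(m+3)-2) := chA_congr s (by omega)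
              _ = chA s (i+(m+3)-1) := hc3.symm
              _ = chA s (i+(m+1)+1) := chA_congr s (by omega)
          exact W_lemma s (m+1) i (by omega) hc2 hpR' hGL hGR

theorem Gb_drawB (s : List Char) : ∀ (d i : Nat), d % 2 = 0 →
    Gb s i d = true → drawB s i d = true := by
  intro d
  induction d using Nat.strong_induction_on with
  | _ d ih =>
    intro i hpar hG
    match d, hpar, hG with
    | 0, _, _ => simp [drawB]
    | 2, _, hG =>
      rw [Gb_unfold] at hG
      by_cases hc : chA s i = chA s (i+0+1)
      · show (decide (chA s i = chA s (i+1))) = true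
        simp only [decide_eq_true_eq]
        calc chA s i = chA s (i+0+1) := hc
          _ = chA s (i+1) := chA_congr s (by omega)
      · rw [if_neg hc] at hG
        exact Mb_drawB s 2 i hG
    | (m+3), hpar, hG =>
      have e : (m+1)+2 = m+3 := by omega
      rw [← e, Gb_unfold] at hG
      by_cases hc : chA s i = chA s (i+(m+1)+1)
      · rw [if_pos hc] at hG
        have hd : drawB s (i+1) (m+1) = true := ih (m+1) (by omega) (i+1) (by omega) hG
        apply (drawB_iff s i m).mpr
        have hc' : chA s i = chA s (i+(m+3)-1) := by
          calc chA s i = chA s (i+(m+1)+1) := hc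
            _ = chA s (i+(m+3)-1) := chA_congr s (by omega)
        exact ⟨Or.inl ⟨hc', hd⟩, Or.inl ⟨hc', hd⟩⟩
      · rw [if_neg hc] at hG
        rw [e] at hG
        exact Mb_drawB s (m+3) i hG

-- the two characterizations agree on blocks of even length
theorem drawB_eq_Gb (s : List Char) (d i : Nat) (hpar : d % 2 = 0) :
    drawB s i d = Gb s i d := by
  by_cases h : drawB s i d = true
  · rw [h, drawB_Gb s d i hpar h]
  · rw [Bool.not_eq_true] at h
    rw [h]
    by_cases h2 : Gb s i d = true
    · rw [Gb_drawB s d i hpar h2] at h; simp at h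
    · rw [Bool.not_eq_true] at h2; rw [h2]

-- ===== B side: the ports of the two while loops compute the greedy check =====

-- proof-side mirror of bStrip on Nat intervals (left index, length)
def gStrip (s : List Char) (i d : Nat) : Nat × Nat :=
  if 2 ≤ d ∧ chA s i = chA s (i+d-1) then gStrip s (i+1) (d-2) else (i, d)
termination_by d
decreasing_by omega

theorem gStrip_unfold (s : List Char) (i d : Nat) : gStrip s i d =
    if 2 ≤ d ∧ chA s i = chA s (i+d-1) then gStrip s (i+1) (d-2) else (i, d) := by
  rw [gStrip]

theorem bStrip_eq_gStrip (s : List Char) : ∀ (d i : Nat),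
    bStrip s (i : Int) ((i : Int) + d - 1) =
      (((gStrip s i d).1 : Int), ((gStrip s i d).1 : Int) + ((gStrip s i d).2 : Int) - 1) := by
  intro d
  induction d using Nat.strong_induction_on with
  | _ d ih =>
    intro i
    rw [bStrip, gStrip_unfold]
    by_cases hlt : 2 ≤ d
    · have ht1 : ((i : Int)).toNat = i := by omega
      have ht2 : ((i : Int) + d - 1).toNat = i + d - 1 := by omega
      by_cases hch : chA s i = chA s (i+d-1)
      · rw [if_pos (by refine ⟨by omega, ?_⟩; rw [ht1, ht2]; exact hch),
            if_pos (by exact ⟨hlt, hch⟩)]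
        have e : (i : Int) + d - 1 - 1 = ((i+1 : Nat) : Int) + ((d-2 : Nat) : Int) - 1 := by omega
        rw [e]
        have := ih (d-2) (by omega) (i+1)
        convert this using 3
      · rw [if_neg (by rintro ⟨-, h2⟩; rw [ht1, ht2] at h2; exact hch h2),
            if_neg (by rintro ⟨-, h2⟩; exact hch h2)]
    · rw [if_neg (by rintro ⟨h1, -⟩; omega), if_neg (by rintro ⟨h1, -⟩; omega)]

theorem gStrip_parity (s : List Char) : ∀ (d i : Nat), (gStrip s i d).2 % 2 = d % 2 := by
  intro d
  induction d using Nat.strong_induction_on with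
  | _ d ih =>
    intro i
    rw [gStrip_unfold]
    by_cases h : 2 ≤ d ∧ chA s i = chA s (i+d-1)
    · rw [if_pos h]
      rw [ih (d-2) (by omega) (i+1)]
      omega
    · rw [if_neg h]

theorem Gb_eq_gStrip_Mb (s : List Char) : ∀ (d i : Nat),
    Gb s i d = Mb s (gStrip s i d).1 (gStrip s i d).2 := by
  intro d
  induction d using Nat.strong_induction_on with
  | _ d ih =>
    intro i
    rw [gStrip_unfold]
    by_cases h : 2 ≤ d ∧ chA s i = chA s (i+d-1)
    · rw [if_pos h]
      obtain ⟨h1, h2⟩ := h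
      match d, h1, h2 with
      | (m+2), _, h2 =>
        rw [Gb_unfold]
        have h2' : chA s i = chA s (i+m+1) := by
          calc chA s i = chA s (i+(m+2)-1) := h2
            _ = chA s (i+m+1) := chA_congr s (by omega)
        rw [if_pos h2']
        have e : m+2-2 = m := by omega
        rw [e]
        exact ih m (by omega) (i+1)
    · rw [if_neg h]
      match d with
      | 0 => simp [Gb, Mb]
      | 1 => simp [Gb, Mb]
      | (m+2) =>
        rw [Gb_unfold]
        have hne : ¬ chA s i = chA s (i+m+1) := by
          intro hc
          apply h
          refine ⟨by omega, ?_⟩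
          calc chA s i = chA s (i+m+1) := hc
            _ = chA s (i+(m+2)-1) := chA_congr s (by omega)
        rw [if_neg hne]

theorem bPairs_eq_Mb (s : List Char) : ∀ (d i : Nat), d % 2 = 0 →
    bPairs s (i : Int) ((i : Int) + d - 1) = (if Mb s i d = true then "Draw" else "Alice") := by
  intro d
  induction d using Nat.strong_induction_on with
  | _ d ih =>
    intro i hpar
    rw [bPairs]
    match d, hpar with
    | 0, _ =>
      rw [if_neg (by omega)]
      simp [Mb]
    | (m+2), hpar =>
      rw [if_pos (by omega)]
      have ht1 : ((i : Int)).toNat = i := by omega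
      have ht2 : ((i : Int) + 1).toNat = i + 1 := by omega
      rw [ht1, ht2]
      by_cases hch : chA s i = chA s (i+1)
      · rw [if_neg (by simpa using hch)]
        have e : (i : Int) + (m+2 : Nat) - 1 = ((i+2 : Nat) : Int) + ((m : Nat) : Int) - 1 := by
          push_cast; omega
        have e2 : (i : Int) + 2 = ((i+2 : Nat) : Int) := by push_cast; omega
        rw [e, e2, ih m (by omega) (i+2) (by omega)]
        by_cases hM : Mb s (i+2) m = true
        · rw [if_pos hM, if_pos ((Mb_cons s i m).mpr ⟨hch, hM⟩)]
        · rw [if_neg hM, if_neg (by intro hc; exact hM ((Mb_cons s i m).mp hc).2)]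
      · rw [if_pos (by simpa using hch)]
        rw [if_neg (by intro hc; exact hch ((Mb_cons s i m).mp hc).1)]

-- B's result in terms of the greedy check
theorem solve_alt_char (S : String) :
    solve_alt S = (if S.toList.length % 2 = 0 ∧ Gb S.toList 0 S.toList.length = true
                   then "Draw" else "Alice") := by
  have hb := bStrip_eq_gStrip S.toList S.toList.length 0
  simp only [Nat.cast_zero, zero_add] at hb
  show (if (bStrip S.toList 0 ((S.toList.length : Int) - 1)).1 > (bStrip S.toList 0 ((S.toList.length : Int) - 1)).2
        then "Draw"
        else if PySem.Int.mod ((bStrip S.toList 0 ((S.toList.length : Int) - 1)).2 - (bStrip S.toList 0 ((S.toList.length : Int) - 1)).1) 2 = 0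
        then "Alice"
        else bPairs S.toList (bStrip S.toList 0 ((S.toList.length : Int) - 1)).1 (bStrip S.toList 0 ((S.toList.length : Int) - 1)).2) = _
  rw [hb]
  set i' := (gStrip S.toList 0 S.toList.length).1 with hi'
  set d' := (gStrip S.toList 0 S.toList.length).2 with hd'
  have hpar := gStrip_parity S.toList S.toList.length 0
  have hGb := Gb_eq_gStrip_Mb S.toList S.toList.length 0
  rw [← hd'] at hpar
  rw [← hi', ← hd'] at hGb
  by_cases hz : d' = 0
  · -- stripped everything: draw
    rw [if_pos (show ((i' : Int)) > (i' : Int) + d' - 1 by rw [hz]; omega)]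
    rw [if_pos ⟨by omega, by rw [hGb, hz]; simp [Mb]⟩]
  · rw [if_neg (show ¬ ((i' : Int)) > (i' : Int) + d' - 1 by omega)]
    have em : (i' : Int) + d' - 1 - i' = ((d' - 1 : Nat) : Int) := by omega
    by_cases hodd : d' % 2 = 1
    · -- odd remainder (the string length is odd): Alice
      rw [if_pos (show PySem.Int.mod ((i' : Int) + d' - 1 - i') 2 = 0 by
            rw [em, show (2:Int) = ((2:Nat):Int) from rfl, PySem.Int.mod_natCast]; omega)]
      rw [if_neg (by rintro ⟨h, -⟩; omega)]
    · -- even remainder ≥ 2: pairs check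
      rw [if_neg (show ¬ PySem.Int.mod ((i' : Int) + d' - 1 - i') 2 = 0 by
            rw [em, show (2:Int) = ((2:Nat):Int) from rfl, PySem.Int.mod_natCast]; omega)]
      rw [bPairs_eq_Mb S.toList d' i' (by omega)]
      rw [hGb]
      by_cases hM : Mb S.toList i' d' = true
      · rw [if_pos hM, if_pos ⟨by omega, hM⟩]
      · rw [if_neg hM, if_neg (by rintro ⟨-, h⟩; exact hM h)]

-- ===== A side: the dp table computes drawB =====

theorem getD_set_self (l : List Int) (i : Nat) (v d : Int) (h : i < l.length) :
    (l.set i v).getD i d = v := by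
  simp [List.getD_eq_getElem?_getD, List.getElem?_set_self h]

theorem getD_set_ne (l : List Int) (i j : Nat) (v d : Int) (h : i ≠ j) :
    (l.set i v).getD j d = l.getD j d := by
  simp [List.getD_eq_getElem?_getD, List.getElem?_set_ne h]

theorem getDL_set_self (l : List (List Int)) (i : Nat) (v : List Int) (h : i < l.length) :
    (l.set i v).getD i [] = v := by
  simp [List.getD_eq_getElem?_getD, List.getElem?_set_self h]

theorem getDL_set_ne (l : List (List Int)) (i j : Nat) (v : List Int) (h : i ≠ j) :
    (l.set i v).getD j [] = l.getD j [] := by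
  simp [List.getD_eq_getElem?_getD, List.getElem?_set_ne h]

-- well-formed table: N+1 rows, each visible row of width N+1
def wfT (N : Nat) (dp : List (List Int)) : Prop :=
  dp.length = N+1 ∧ ∀ k, k ≤ N → (dp.getD k []).length = N+1

theorem wfT_set2 {N : Nat} {dp : List (List Int)} (h : wfT N dp) (i j : Nat) (v : Int) :
    wfT N (set2 dp i j v) := by
  obtain ⟨h1, h2⟩ := h
  refine ⟨by simp [set2, h1], ?_⟩
  intro k hk
  by_cases hik : i = k
  · subst hik
    by_cases hlt : i < dp.length
    · rw [set2, getDL_set_self _ _ _ hlt, List.length_set]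
      exact h2 i hk
    · omega
  · rw [set2, getDL_set_ne _ _ _ _ hik]
    exact h2 k hk

theorem get2_set2_self {N : Nat} {dp : List (List Int)} (h : wfT N dp) (i j : Nat) (v : Int)
    (hi : i ≤ N) (hj : j ≤ N) : get2 (set2 dp i j v) i j = v := by
  obtain ⟨h1, h2⟩ := h
  rw [get2, set2, getDL_set_self _ _ _ (by omega)]
  rw [getD_set_self _ _ _ _ (by rw [h2 i hi]; omega)]

theorem get2_set2_ne {N : Nat} {dp : List (List Int)} (h : wfT N dp) (i j i' j' : Nat) (v : Int)
    (hne : i' ≠ i ∨ j' ≠ j) : get2 (set2 dp i j v) i' j' = get2 dp i' j' := by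
  obtain ⟨h1, h2⟩ := h
  by_cases hik : i = i'
  · subst hik
    rcases hne with hne | hne
    · omega
    · by_cases hlt : i < dp.length
      · rw [get2, set2, getDL_set_self _ _ _ hlt, getD_set_ne _ _ _ _ _ (by omega), get2]
      · rw [get2, set2, List.set_eq_of_length_le (by omega), get2]
  · rw [get2, set2, getDL_set_ne _ _ _ _ hik, get2]

-- the table agrees with a value function on all cells of the (N+1)×(N+1) square
def agreeT (N : Nat) (dp : List (List Int)) (f : Nat → Nat → Int) : Prop :=
  wfT N dp ∧ ∀ i j, i ≤ N → j ≤ N → get2 dp i j = f i j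

theorem agree_congr {N : Nat} {dp : List (List Int)} {f g : Nat → Nat → Int}
    (h : agreeT N dp f) (hfg : ∀ i j, i ≤ N → j ≤ N → f i j = g i j) : agreeT N dp g := by
  exact ⟨h.1, fun i j hi hj => by rw [h.2 i j hi hj, hfg i j hi hj]⟩

theorem agree_init (N : Nat) :
    agreeT N (List.replicate (N+1) (List.replicate (N+1) (1:Int))) (fun _ _ => 1) := by
  constructor
  · constructor
    · simp
    · intro k hk
      rw [List.getD_eq_getElem?_getD, List.getElem?_replicate_of_lt (by omega)]
      simp
  · intro i j hi hj
    rw [get2]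
    have hrow : (List.replicate (N+1) (List.replicate (N+1) (1:Int))).getD i []
        = List.replicate (N+1) (1:Int) := by
      rw [List.getD_eq_getElem?_getD, List.getElem?_replicate_of_lt (by omega)]; rfl
    rw [hrow, List.getD_eq_getElem?_getD, List.getElem?_replicate_of_lt (by omega)]; rfl

-- the diagonal loop
theorem agree_diag {N : Nat} {dp : List (List Int)} {f : Nat → Nat → Int} :
    ∀ (n : Nat), n ≤ N+1 → agreeT N dp f →
    agreeT N ((List.range n).foldl (fun dp i => set2 dp i i 0) dp)
      (fun i j => if i = j ∧ i < n then 0 else f i j) := by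
  intro n
  induction n with
  | zero =>
    intro _ h
    simp only [List.range_zero, List.foldl_nil]
    exact agree_congr h (fun i j _ _ => by
      rw [if_neg (by rintro ⟨-, h2⟩; omega)])
  | succ n ih =>
    intro hn h
    rw [List.range_succ, List.foldl_append, List.foldl_cons, List.foldl_nil]
    have hprev := ih (by omega) h
    refine ⟨wfT_set2 hprev.1 n n 0, ?_⟩
    intro i j hi hj
    by_cases hcell : i = n ∧ j = n
    · obtain ⟨rfl, rfl⟩ := hcell
      rw [get2_set2_self hprev.1 _ _ _ hi hj]
      beta_reduce
      rw [if_pos ⟨rfl, by omega⟩]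
    · rw [get2_set2_ne hprev.1 _ _ _ _ _ (by tauto), hprev.2 i j hi hj]
      beta_reduce
      by_cases h1 : i = j ∧ i < n
      · rw [if_pos h1, if_pos ⟨h1.1, by omega⟩]
      · rw [if_neg h1, if_neg (by rintro ⟨rfl, hlt⟩; exact h1 ⟨rfl, by omega⟩)]

-- the length-2 loop
theorem agree_d2 {N : Nat} {s : List Char} {dp : List (List Int)} {f : Nat → Nat → Int} :
    ∀ (n : Nat), n ≤ N → agreeT N dp f →
    agreeT N ((List.range n).foldl
        (fun dp i => set2 dp i (i+2) (if chA s i = chA s (i+1) then 0 else 1)) dp)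
      (fun i j => if j = i+2 ∧ i < n then (if drawB s i 2 = true then 0 else 1) else f i j) := by
  intro n
  induction n with
  | zero =>
    intro _ h
    simp only [List.range_zero, List.foldl_nil]
    exact agree_congr h (fun i j _ _ => by
      rw [if_neg (by rintro ⟨-, h2⟩; omega)])
  | succ n ih =>
    intro hn h
    rw [List.range_succ, List.foldl_append, List.foldl_cons, List.foldl_nil]
    have hprev := ih (by omega) h
    refine ⟨wfT_set2 hprev.1 _ _ _, ?_⟩
    intro i j hi hj
    by_cases hcell : i = n ∧ j = n+2
    · obtain ⟨rfl, rfl⟩ := hcell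
      rw [get2_set2_self hprev.1 _ _ _ hi hj]
      beta_reduce
      have hcnd : i+2 = i+2 ∧ i < i+1 := ⟨rfl, by omega⟩
      rw [if_pos hcnd]
      have hdb : drawB s i 2 = decide (chA s i = chA s (i+1)) := rfl
      rw [hdb]
      by_cases hc : chA s i = chA s (i+1)
      · simp [hc]
      · simp [hc]
    · rw [get2_set2_ne hprev.1 _ _ _ _ _ (by tauto), hprev.2 i j hi hj]
      beta_reduce
      by_cases h1 : j = i+2 ∧ i < n
      · have hcnd2 : j = i+2 ∧ i < n+1 := ⟨h1.1, by omega⟩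
        rw [if_pos h1, if_pos hcnd2]
      · rw [if_neg h1, if_neg (by rintro ⟨rfl, hlt⟩; exact h1 ⟨rfl, by omega⟩)]

-- final cell values once all diagonals up to D are filled in
def valD (s : List Char) (N D : Nat) : Nat → Nat → Int := fun i j =>
  if i = j then 0
  else if i < j ∧ j ≤ N ∧ (j-i) % 2 = 0 ∧ j-i ≤ D ∧ drawB s i (j-i) = true then 0 else 1

theorem valD_read {s : List Char} {N D : Nat} (i j : Nat) (hij : i < j) (hjN : j ≤ N)
    (hgap2 : (j-i) % 2 = 0) (hgapD : j-i ≤ D) :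
    valD s N D i j = (if drawB s i (j-i) = true then 0 else 1) := by
  unfold valD
  rw [if_neg (by omega)]
  by_cases h : drawB s i (j-i) = true
  · rw [if_pos ⟨hij, hjN, hgap2, hgapD, h⟩, if_pos h]
  · rw [if_neg (by rintro ⟨-, -, -, -, hdb⟩; exact h hdb), if_neg h]

theorem ite01_eq_zero (b : Bool) : ((if b = true then (0:Int) else 1) = 0) ↔ b = true := by
  cases b <;> simp

theorem drawB_iff' (s : List Char) (i d : Nat) (h4 : 4 ≤ d) : drawB s i d = true ↔
    ((chA s i = chA s (i+d-1) ∧ drawB s (i+1) (d-2) = true) ∨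
     (chA s i = chA s (i+1) ∧ drawB s (i+2) (d-2) = true)) ∧
    ((chA s i = chA s (i+d-1) ∧ drawB s (i+1) (d-2) = true) ∨
     (chA s (i+d-1) = chA s (i+d-2) ∧ drawB s i (d-2) = true)) := by
  obtain ⟨m, rfl⟩ : ∃ m, d = m+3 := ⟨d-3, by omega⟩
  rw [show m+3-2 = m+1 from by omega]
  exact drawB_iff s i m

-- one inner pass at diagonal d
theorem agree_inner {N d : Nat} {s : List Char}
    (hd2 : d % 2 = 0) (hd4 : 4 ≤ d) (hdN : d ≤ N) :
    ∀ (n : Nat) {dp : List (List Int)}, n ≤ N-d+1 → agreeT N dp (valD s N (d-2)) →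
    agreeT N ((List.range n).foldl (innerStep s d) dp)
      (fun i j => if j = i+d ∧ i < n ∧ drawB s i d = true then 0 else valD s N (d-2) i j) := by
  intro n
  induction n with
  | zero =>
    intro dp _ h
    simp only [List.range_zero, List.foldl_nil]
    exact agree_congr h (fun i j _ _ => by
      rw [if_neg (by rintro ⟨-, h2, -⟩; omega)])
  | succ n ih =>
    intro dp hn h
    rw [List.range_succ, List.foldl_append, List.foldl_cons, List.foldl_nil]
    have hprev := ih (by omega) h
    set dpn := (List.range n).foldl (innerStep s d) dp with hdpn
    have hnd : n + d ≤ N := by omega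
    -- the three reads are on diagonal d-2, untouched by this pass
    have hrd1 : get2 dpn (n+1) (n+d-1) = (if drawB s (n+1) (d-2) = true then 0 else 1) := by
      rw [hprev.2 (n+1) (n+d-1) (by omega) (by omega)]
      beta_reduce
      rw [if_neg (by rintro ⟨h1, -⟩; omega),
          valD_read (n+1) (n+d-1) (by omega) (by omega) (by omega) (by omega),
          show (n+d-1)-(n+1) = d-2 from by omega]
    have hrd2 : get2 dpn (n+2) (n+d) = (if drawB s (n+2) (d-2) = true then 0 else 1) := by
      rw [hprev.2 (n+2) (n+d) (by omega) (by omega)]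
      beta_reduce
      rw [if_neg (by rintro ⟨h1, -⟩; omega),
          valD_read (n+2) (n+d) (by omega) (by omega) (by omega) (by omega),
          show (n+d)-(n+2) = d-2 from by omega]
    have hrd3 : get2 dpn n (n+d-2) = (if drawB s n (d-2) = true then 0 else 1) := by
      rw [hprev.2 n (n+d-2) (by omega) (by omega)]
      beta_reduce
      rw [if_neg (by rintro ⟨h1, -⟩; omega),
          valD_read n (n+d-2) (by omega) (by omega) (by omega) (by omega),
          show (n+d-2)-n = d-2 from by omega]
    have hcnd : (((chA s n = chA s (n+d-1) ∧ get2 dpn (n+1) (n+d-1) = 0) ∨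
                  (chA s n = chA s (n+1) ∧ get2 dpn (n+2) (n+d) = 0)) ∧
                 ((chA s n = chA s (n+d-1) ∧ get2 dpn (n+1) (n+d-1) = 0) ∨
                  (chA s (n+d-1) = chA s (n+d-2) ∧ get2 dpn n (n+d-2) = 0)))
                ↔ drawB s n d = true := by
      rw [hrd1, hrd2, hrd3, ite01_eq_zero, ite01_eq_zero, ite01_eq_zero]
      exact (drawB_iff' s n d hd4).symm
    show agreeT N (innerStep s d dpn n) _
    by_cases hdb : drawB s n d = true
    · have hstep : innerStep s d dpn n = set2 dpn n (n+d) 0 := by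
        unfold innerStep
        rw [if_pos (hcnd.mpr hdb)]
      rw [hstep]
      refine ⟨wfT_set2 hprev.1 _ _ _, ?_⟩
      intro i j hi hj
      by_cases hcell : i = n ∧ j = n+d
      · obtain ⟨rfl, rfl⟩ := hcell
        rw [get2_set2_self hprev.1 _ _ _ hi hj]
        beta_reduce
        have hcnd2 : i+d = i+d ∧ i < i+1 ∧ drawB s i d = true := ⟨rfl, by omega, hdb⟩
        rw [if_pos hcnd2]
      · rw [get2_set2_ne hprev.1 _ _ _ _ _ (by tauto), hprev.2 i j hi hj]
        beta_reduce
        by_cases h1 : j = i+d ∧ i < n ∧ drawB s i d = true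
        · have hcnd2 : j = i+d ∧ i < n+1 ∧ drawB s i d = true := ⟨h1.1, by omega, h1.2.2⟩
          rw [if_pos h1, if_pos hcnd2]
        · rw [if_neg h1, if_neg (by
            rintro ⟨rfl, hlt, hdb'⟩
            have hin : i ≠ n := fun he => hcell ⟨he, by omega⟩
            exact h1 ⟨rfl, by omega, hdb'⟩)]
    · have hstep : innerStep s d dpn n = dpn := by
        unfold innerStep
        rw [if_neg (fun hc => hdb (hcnd.mp hc))]
      rw [hstep]
      refine agree_congr hprev (fun i j hi hj => ?_)
      by_cases h1 : j = i+d ∧ i < n ∧ drawB s i d = true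
      · have hcnd2 : j = i+d ∧ i < n+1 ∧ drawB s i d = true := ⟨h1.1, by omega, h1.2.2⟩
        rw [if_pos h1, if_pos hcnd2]
      · rw [if_neg h1, if_neg (by
          rintro ⟨rfl, hlt, hdb'⟩
          by_cases hin : i = n
          · subst hin; exact hdb hdb'
          · exact h1 ⟨rfl, by omega, hdb'⟩)]

-- cells beyond the filled diagonals still hold 1
theorem valD_gt {s : List Char} {N D : Nat} (i j : Nat) (hij : i ≠ j) (hgt : D < j - i) :
    valD s N D i j = 1 := by
  unfold valD
  rw [if_neg hij, if_neg (by rintro ⟨-, -, -, h4, -⟩; omega)]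

-- extending the filled range by one diagonal changes no other cell
theorem valD_succ2 {s : List Char} {N D : Nat} (i j : Nat) (hD2 : D % 2 = 0)
    (hne : j ≠ i + (D+2)) : valD s N (D+2) i j = valD s N D i j := by
  unfold valD
  by_cases hij : i = j
  · rw [if_pos hij, if_pos hij]
  · rw [if_neg hij, if_neg hij]
    by_cases hc : i < j ∧ j ≤ N ∧ (j-i) % 2 = 0 ∧ j-i ≤ D ∧ drawB s i (j-i) = true
    · rw [if_pos (show i < j ∧ j ≤ N ∧ (j-i) % 2 = 0 ∧ j-i ≤ D+2 ∧ drawB s i (j-i) = true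
        from ⟨hc.1, hc.2.1, hc.2.2.1, by omega, hc.2.2.2.2⟩), if_pos hc]
    · rw [if_neg (by
        rintro ⟨h1, h2, h3, h4, h5⟩
        have : j - i ≠ D+2 := fun he => hne (by omega)
        exact hc ⟨h1, h2, h3, by omega, h5⟩), if_neg hc]

-- the outer loop over d = D+2, D+4, …
theorem agree_outer {N : Nat} {s : List Char} :
    ∀ (K D : Nat) {dp : List (List Int)}, D % 2 = 0 → 2 ≤ D → (K = 0 ∨ D + 2*K ≤ N) →
    agreeT N dp (valD s N D) →
    agreeT N ((List.range' (D+2) K 2).foldl (outerStep s N) dp) (valD s N (D+2*K)) := by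
  intro K
  induction K with
  | zero =>
    intro D dp _ _ _ h
    simpa using h
  | succ K ih =>
    intro D dp hD2 hDge hKN h
    have hDN : D + 2*(K+1) ≤ N := by omega
    have hstep : (List.range' (D+2) (K+1) 2) = (D+2) :: List.range' (D+2+2) K 2 := by
      simp [List.range']
    rw [hstep, List.foldl_cons]
    have hin := agree_inner (d := D+2) (N := N) (s := s) (by omega) (by omega) (by omega)
      (N-(D+2)+1) (le_refl _) h
    have hmid : agreeT N (outerStep s N dp (D+2)) (valD s N (D+2)) := by
      refine agree_congr hin (fun i j hi hj => ?_)
      beta_reduce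
      rw [show (D+2)-2 = D from by omega]
      by_cases hcell : j = i+(D+2)
      · subst hcell
        have hR := valD_read (s := s) (D := D+2) i (i+(D+2)) (by omega) hj (by omega) (by omega)
        rw [show i+(D+2)-i = D+2 from by omega] at hR
        rw [hR]
        by_cases hdb : drawB s i (D+2) = true
        · rw [if_pos (show i+(D+2) = i+(D+2) ∧ i < N-(D+2)+1 ∧ drawB s i (D+2) = true
            from ⟨rfl, by omega, hdb⟩), if_pos hdb]
        · rw [if_neg (by rintro ⟨-, -, h3⟩; exact hdb h3), if_neg hdb,
              valD_gt i (i+(D+2)) (by omega) (by omega)]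
      · rw [if_neg (by rintro ⟨h1, -⟩; exact hcell h1), valD_succ2 i j hD2 hcell]
    have := ih (D+2) (by omega) (by omega) (by omega) hmid
    refine agree_congr this (fun i j hi hj => by rw [show D+2+2*K = D+2*(K+1) from by omega])

-- A's return value in terms of drawB
theorem solve_char (S : String) :
    solve S = (if S.toList.length % 2 = 0 ∧ drawB S.toList 0 S.toList.length = true
               then "Draw" else "Alice") := by
  set s := S.toList with hs
  set N := s.length with hN
  have h0 := agree_init N
  have h1 := agree_diag (N+1) (le_refl _) h0
  have h1' : agreeT N ((List.range (N+1)).foldl (fun dp i => set2 dp i i 0)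
      (List.replicate (N+1) (List.replicate (N+1) (1:Int))))
      (fun i j => if i = j then 0 else 1) := by
    refine agree_congr h1 (fun i j hi hj => ?_)
    beta_reduce
    by_cases hij : i = j
    · rw [if_pos (show i = j ∧ i < N+1 from ⟨hij, by omega⟩), if_pos hij]
    · rw [if_neg (by rintro ⟨h1, -⟩; exact hij h1), if_neg hij]
  have h2 := agree_d2 (s := s) (N-1) (by omega) h1'
  have h2' : agreeT N ((List.range (N-1)).foldl
      (fun dp i => set2 dp i (i+2) (if chA s i = chA s (i+1) then 0 else 1))
      ((List.range (N+1)).foldl (fun dp i => set2 dp i i 0)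
        (List.replicate (N+1) (List.replicate (N+1) (1:Int)))))
      (valD s N 2) := by
    refine agree_congr h2 (fun i j hi hj => ?_)
    beta_reduce
    by_cases hij : i = j
    · rw [if_neg (by rintro ⟨h1, -⟩; omega)]
      unfold valD
      rw [if_pos hij]
      rw [if_pos hij]
    · by_cases hcell : j = i+2
      · subst hcell
        have hR := valD_read (s := s) (D := 2) i (i+2) (by omega) hj (by omega) (by omega)
        rw [show i+2-i = 2 from by omega] at hR
        rw [hR, if_pos (show i+2 = i+2 ∧ i < N-1 from ⟨rfl, by omega⟩)]
      · rw [if_neg (by rintro ⟨h1, -⟩; exact hcell h1)]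
        unfold valD
        rw [if_neg hij]
        rw [if_neg hij]
        rw [if_neg (by rintro ⟨h1', h2', h3', h4', -⟩; exact hcell (by omega))]
  have h3 := agree_outer (s := s) ((N-2)/2) 2 (by omega) (by omega) (by omega) h2'
  have hfin : get2 ((List.range' 4 ((N-2)/2) 2).foldl (outerStep s N)
      ((List.range (N-1)).foldl
        (fun dp i => set2 dp i (i+2) (if chA s i = chA s (i+1) then 0 else 1))
        ((List.range (N+1)).foldl (fun dp i => set2 dp i i 0)
          (List.replicate (N+1) (List.replicate (N+1) (1:Int)))))) 0 N
      = (if N % 2 = 0 ∧ drawB s 0 N = true then 0 else 1) := by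
    have hv := h3.2 0 N (by omega) (le_refl _)
    rw [show (2+2 : Nat) = 4 from rfl] at hv
    rw [hv]
    unfold valD
    by_cases hN0 : N = 0
    · rw [if_pos (by omega), if_pos (show N % 2 = 0 ∧ drawB s 0 N = true
        from ⟨by omega, by rw [hN0]; rfl⟩)]
    · rw [if_neg (by omega), show N - 0 = N from by omega]
      by_cases hc : N % 2 = 0 ∧ drawB s 0 N = true
      · rw [if_pos (show 0 < N ∧ N ≤ N ∧ N % 2 = 0 ∧ N ≤ 2+2*((N-2)/2) ∧ drawB s 0 N = true
          from ⟨by omega, le_refl _, hc.1, by omega, hc.2⟩), if_pos hc]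
      · rw [if_neg (by rintro ⟨-, -, h3', -, h5⟩; exact hc ⟨h3', h5⟩), if_neg hc]
  show (if get2 ((List.range' 4 ((N-2)/2) 2).foldl (outerStep s N)
      ((List.range (N-1)).foldl
        (fun dp i => set2 dp i (i+2) (if chA s i = chA s (i+1) then 0 else 1))
        ((List.range (N+1)).foldl (fun dp i => set2 dp i i 0)
          (List.replicate (N+1) (List.replicate (N+1) (1:Int)))))) 0 N = 1
    then "Alice" else "Draw") = _
  rw [hfin]
  by_cases hc : N % 2 = 0 ∧ drawB s 0 N = true
  · rw [if_pos hc, if_pos hc, if_neg (by norm_num)]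
  · rw [if_neg hc, if_neg hc, if_pos rfl]

theorem solve_spec : Claim_equal_solve := by
  unfold Claim_equal_solve
  intro S _
  unfold Spec_solve
  rw [solve_char, solve_alt_char]
  by_cases hp : S.toList.length % 2 = 0
  · rw [drawB_eq_Gb S.toList S.toList.length 0 hp]
  · rw [if_neg (by rintro ⟨h, -⟩; exact hp h), if_neg (by rintro ⟨h, -⟩; exact hp h)]
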